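-- pv_equiv track=rewrite | github.com/geoffscott/completion-skill | scripts/db.py | enrich_entities
-- ===== SOURCE A (Python) =====
-- from typing import Dict, List, Optional, Tuple
--
-- def enrich_entities(text: str, entity_index: Dict[str, str]) -> List[str]:
--     """
--     Scan text for known entity names/aliases. Returns deduplicated list of entity IDs.
--     Matches whole words only (case-insensitive).
--     """
--     if not entity_index or not text:
--         return []
--
--     text_lower = text.lower()
--     found = set()
--
--     # Sort by length descending so longer names match first (e.g., "Dani Pascarella" before "Dani")
--     for name in sorted(entity_index.keys(), key=len, reverse=True):
--         # Simple word-boundary check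
--         idx = text_lower.find(name)
--         if idx != -1:
--             # Check boundaries (start/end of string or non-alnum char)
--             before = idx == 0 or not text_lower[idx - 1].isalnum()
--             after = (idx + len(name) >= len(text_lower)) or not text_lower[idx + len(name)].isalnum()
--             if before and after:
--                 found.add(entity_index[name])
--
--     return sorted(found)
-- ===== SOURCE B (Python) =====
-- def enrich_entities(text: str, entity_index: dict) -> list:
--     """
--     Scan text for known entity names/aliases. Returns deduplicated list of entity IDs.
--     Matches whole words only (case-insensitive): the first occurrence of each name in
--     the lowered text is located by one sliding-window pass per distinct name length,
--     then word-boundary checked.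
--     """
--     if not text or not entity_index:
--         return []
--
--     low = text.lower()
--     n = len(low)
--
--     by_len = {}
--     for name in entity_index:
--         by_len.setdefault(len(name), []).append(name)
--
--     # earliest occurrence index of each name that occurs in low at all
--     first = {}
--     for L, names in by_len.items():
--         pending = set(names)
--         for i in range(n - L + 1):
--             if not pending:
--                 break
--             window = low[i:i + L]
--             if window in pending:
--                 pending.discard(window)
--                 first[window] = i
--
--     found = set()
--     for name, i in first.items():
--         j = i + len(name)
--         if (i == 0 or not low[i - 1].isalnum()) and (j >= n or not low[j].isalnum()):
--             found.add(entity_index[name])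
--     return sorted(found)
-- ===== Notes on version B (the rewrite author's own statement) =====
-- stated objective: faster
-- what changed: B replaces A's per-name str.find over the whole text (over names sorted by length descending, a sort irrelevant to the returned set) by a multi-pattern scan: names are grouped by length and, per distinct length, ONE sliding-window pass over the lowered text records the earliest occurrence of every still-pending name; the recorded positions are then word-boundary checked.
import Mathlib
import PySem

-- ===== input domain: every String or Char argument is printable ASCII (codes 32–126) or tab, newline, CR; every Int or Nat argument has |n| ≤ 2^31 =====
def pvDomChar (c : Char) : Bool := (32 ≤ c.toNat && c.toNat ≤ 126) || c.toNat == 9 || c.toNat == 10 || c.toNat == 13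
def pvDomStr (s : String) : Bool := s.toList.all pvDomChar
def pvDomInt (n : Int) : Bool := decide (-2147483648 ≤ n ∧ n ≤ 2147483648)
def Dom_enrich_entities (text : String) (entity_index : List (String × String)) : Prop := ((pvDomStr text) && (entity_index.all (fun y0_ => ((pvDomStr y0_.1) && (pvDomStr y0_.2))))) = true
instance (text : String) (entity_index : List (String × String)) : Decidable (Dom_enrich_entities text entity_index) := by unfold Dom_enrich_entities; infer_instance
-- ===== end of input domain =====

-- B re-implements A by a multi-pattern scan: names are grouped by length and, per distinct
-- length, ONE sliding-window pass over the lowered text records the earliest occurrence of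
-- every name of that length; each recorded position is then word-boundary checked.  A's
-- per-name str.find and its length-descending sort (irrelevant to the returned set)
-- disappear.  Objective: faster — one pass per distinct name length instead of one
-- whole-text find per name.

-- ===== PORT A =====
def enrich_entities (text : String) (entity_index : List (String × String)) : List String :=
  -- if not entity_index or not text: return []
  if entity_index = [] ∨ text = "" then []
  else
    let d := PySem.Dict.ofList entity_index
    let tl := PySem.Chars.lower text.toList          -- text_lower = text.lower()
    -- for name in sorted(entity_index.keys(), key=len, reverse=True):
    let names := PySem.List.sorted d.keys (fun n => PySem.Str.len n) true
    let found : PySem.Set String :=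
      names.foldl (fun found name =>
        let nl := name.toList
        let idx := PySem.Chars.find tl nl            -- idx = text_lower.find(name)
        if idx ≠ -1 then
          -- before = idx == 0 or not text_lower[idx - 1].isalnum()   (index in range whenever read)
          let before := (idx == 0) ||
            ((PySem.Chars.pyGet? tl (idx - 1)).elim false fun ch => !PySem.Chars.isalnum ch)
          -- after = (idx + len(name) >= len(text_lower)) or not text_lower[idx + len(name)].isalnum()
          let after := decide (idx + (nl.length : Int) ≥ (tl.length : Int)) ||
            ((PySem.Chars.pyGet? tl (idx + (nl.length : Int))).elim false fun ch => !PySem.Chars.isalnum ch)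
          if before && after then
            match d.get? name with                   -- found.add(entity_index[name]); key present
            | some eid => PySem.Set.add found eid
            | none => found
          else found
        else found) PySem.Set.empty
    PySem.List.sorted found (fun x => x) false       -- return sorted(found)

-- ===== PORT B =====
-- inner loop of Source B: 'for i in range(n - L + 1): …' over the suffix s = low[i:]; pos = i;
-- a pending name is retired into first (its earliest occurrence) at the first window equal to it.
def pvScanGo (n : Nat) : List Char → Int → PySem.Set (List Char) → PySem.Dict (List Char) Int → PySem.Dict (List Char) Int
  | s, pos, pending, first =>
    if pending = [] then first                        -- if not pending: break
    else if s.length < n then first                   -- range(n - L + 1) exhausted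
    else
      -- window = low[i:i+L]; on a hit: pending.discard(window); first[window] = i
      if s.take n ∈ pending then
        match s with
        | [] => first.insert (s.take n) pos
        | _ :: t =>
            pvScanGo n t (pos + 1) (PySem.Set.discard pending (s.take n))
              (first.insert (s.take n) pos)
      else
        match s with
        | [] => first
        | _ :: t => pvScanGo n t (pos + 1) pending first
  termination_by s => s.length

def enrich_entities_alt (text : String) (entity_index : List (String × String)) : List String :=
  if text = "" ∨ entity_index = [] then []
  else
    let low := PySem.Chars.lower text.toList
    let d := PySem.Dict.ofList entity_index
    -- by_len.setdefault(len(name), []).append(name)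
    let byLen := d.keys.foldl
      (fun bl name => bl.modify (PySem.Str.len name) [] (· ++ [name])) PySem.Dict.empty
    -- for L, names in by_len.items(): one scan per length
    let first := byLen.items.foldl
      (fun f p => pvScanGo p.1.toNat low 0 (PySem.Set.ofList (p.2.map String.toList)) f)
      PySem.Dict.empty
    -- for name, i in first.items(): boundary check, collect the ids
    let found : PySem.Set String := first.items.foldl
      (fun fd p =>
        let i := p.2
        let j := i + (p.1.length : Int)               -- j = i + len(name)
        if ((i == 0) || ((PySem.Chars.pyGet? low (i - 1)).elim false fun ch => !PySem.Chars.isalnum ch))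
            && (decide (j ≥ (low.length : Int)) ||
                ((PySem.Chars.pyGet? low j).elim false fun ch => !PySem.Chars.isalnum ch))
        then match d.get? (String.ofList p.1) with        -- found.add(entity_index[name]); key present
          | some eid => PySem.Set.add fd eid
          | none => fd
        else fd) PySem.Set.empty
    PySem.List.sorted found (fun x => x) false        -- return sorted(found)

-- ===== PRECONDITION & SPEC =====
def Spec_enrich_entities (text : String) (entity_index : List (String × String)) (out : List String) : Prop := out = enrich_entities_alt text entity_index
instance (text : String) (entity_index : List (String × String)) (out : List String) : Decidable (Spec_enrich_entities text entity_index out) := by unfold Spec_enrich_entities; infer_instance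

-- ===== CLAIM (what is proved, stated in full; the proofs are below) =====
def Claim_equal_enrich_entities : Prop := ∀ (text : String) (entity_index : List (String × String)), Dom_enrich_entities text entity_index → Spec_enrich_entities text entity_index (enrich_entities text entity_index)

-- ===== LEMMAS AND PROOFS =====

-- A's per-name verdict: the first occurrence exists and is word-bounded.
def pvAMatch (s name : List Char) : Bool :=
  let idx := PySem.Chars.find s name
  if idx = -1 then false
  else
    ((idx == 0) || ((PySem.Chars.pyGet? s (idx - 1)).elim false fun ch => !PySem.Chars.isalnum ch))
    && (decide (idx + (name.length : Int) ≥ (s.length : Int)) ||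
        ((PySem.Chars.pyGet? s (idx + (name.length : Int))).elim false fun ch => !PySem.Chars.isalnum ch))

theorem pv_find_of_prefix (s name : List Char) (h : name <+: s) :
    PySem.Chars.find s name = 0 := by
  have h0 : 0 ≤ PySem.Chars.find s name := by
    rw [PySem.Chars.find_nonneg_iff]; exact h.isInfix
  obtain ⟨-, hmin⟩ := PySem.Chars.find_spec h0
  have : ¬ 0 < (PySem.Chars.find s name).toNat := fun hc => hmin 0 hc (by simpa using h)
  omega

theorem pv_find_of_length_lt (s name : List Char) (h : s.length < name.length) :
    PySem.Chars.find s name = -1 := by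
  rw [PySem.Chars.find_eq_neg_one_iff]
  intro hinf
  exact absurd hinf.length_le (by omega)

theorem pv_find_cons (c : Char) (t name : List Char) (h : ¬ name <+: (c :: t)) :
    PySem.Chars.find (c :: t) name =
      if PySem.Chars.find t name = -1 then -1 else PySem.Chars.find t name + 1 := by
  by_cases ht : PySem.Chars.find t name = -1
  · have hres : PySem.Chars.find (c :: t) name = -1 := by
      rw [PySem.Chars.find_eq_neg_one_iff]
      intro hinf
      have h0 : 0 ≤ PySem.Chars.find (c :: t) name := by
        rw [PySem.Chars.find_nonneg_iff]; exact hinf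
      obtain ⟨hpre, -⟩ := PySem.Chars.find_spec h0
      rcases Nat.eq_zero_or_pos (PySem.Chars.find (c :: t) name).toNat with h00 | hpos
      · rw [h00] at hpre; exact h (by simpa using hpre)
      · have hpre' : name <+: t.drop ((PySem.Chars.find (c :: t) name).toNat - 1) := by
          rwa [show (PySem.Chars.find (c :: t) name).toNat
              = ((PySem.Chars.find (c :: t) name).toNat - 1) + 1 by omega,
            List.drop_succ_cons] at hpre
        have hinf' : name <:+: t := hpre'.isInfix.trans (List.drop_suffix _ _).isInfix
        rw [PySem.Chars.find_eq_neg_one_iff] at ht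
        exact ht hinf'
    simp [ht, hres]
  · have ht0 : 0 ≤ PySem.Chars.find t name := by
      have := PySem.Chars.neg_one_le_find t name; omega
    obtain ⟨hp, hmin⟩ := PySem.Chars.find_spec ht0
    have h0 : 0 ≤ PySem.Chars.find (c :: t) name := by
      rw [PySem.Chars.find_nonneg_iff]
      exact (hp.isInfix.trans (List.drop_suffix _ _).isInfix).trans
        (List.suffix_cons c t).isInfix
    obtain ⟨hp2, hmin2⟩ := PySem.Chars.find_spec h0
    have hm0 : (PySem.Chars.find (c :: t) name).toNat ≠ 0 := by
      intro h00
      rw [h00] at hp2; exact h (by simpa using hp2)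
    have hge : (PySem.Chars.find t name).toNat ≤ (PySem.Chars.find (c :: t) name).toNat - 1 := by
      by_contra hc
      have hc' : (PySem.Chars.find (c :: t) name).toNat - 1 < (PySem.Chars.find t name).toNat := by
        omega
      have hpre' : name <+: t.drop ((PySem.Chars.find (c :: t) name).toNat - 1) := by
        have := hp2
        rwa [show (PySem.Chars.find (c :: t) name).toNat
            = ((PySem.Chars.find (c :: t) name).toNat - 1) + 1 by omega,
          List.drop_succ_cons] at this
      exact hmin _ hc' hpre'
    have hle : (PySem.Chars.find (c :: t) name).toNat ≤ (PySem.Chars.find t name).toNat + 1 := by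
      by_contra hc
      have hc' : (PySem.Chars.find t name).toNat + 1 < (PySem.Chars.find (c :: t) name).toNat := by
        omega
      have hdp : name <+: (c :: t).drop ((PySem.Chars.find t name).toNat + 1) := by
        rw [List.drop_succ_cons]; exact hp
      exact hmin2 _ hc' hdp
    rw [if_neg ht]
    omega

-- B's scan, per name: it records exactly find's result (shifted by pos), else leaves first alone.
theorem pvScanGo_get? (n : Nat) (s : List Char) (pos : Int) (pending : PySem.Set (List Char))
    (first : PySem.Dict (List Char) Int) (hlen : ∀ m ∈ pending, m.length = n)
    (name : List Char) :
    (pvScanGo n s pos pending first).get? name =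
      if name ∈ pending ∧ PySem.Chars.find s name ≠ -1
      then some (pos + PySem.Chars.find s name)
      else first.get? name := by
  induction s generalizing pos pending first with
  | nil =>
    rw [pvScanGo]
    by_cases hp : pending = ([] : PySem.Set (List Char))
    · subst hp; simp
    · rw [if_neg hp]
      by_cases hn : 0 < n
      · rw [if_pos (by simpa using hn)]
        rw [if_neg ?hc]
        case hc =>
          rintro ⟨hmem, hf⟩
          exact hf (pv_find_of_length_lt [] name (by simp [hlen name hmem]; omega))
      · have hn0 : n = 0 := by omega
        subst hn0
        rw [if_neg (by simp)]
        simp only [List.take_nil]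
        by_cases hsub : ([] : List Char) ∈ pending
        · rw [if_pos (by simpa using hsub)]
          by_cases hname : name = ([] : List Char)
          · subst hname
            rw [PySem.Dict.get?_insert_self]
            rw [if_pos ⟨hsub, by simp [PySem.Chars.find_nil]⟩]
            simp [PySem.Chars.find_nil]
          · rw [PySem.Dict.get?_insert_of_ne _ _ hname]
            rw [if_neg ?hc2]
            case hc2 =>
              rintro ⟨hmem, -⟩
              exact hname (List.eq_nil_of_length_eq_zero (hlen name hmem))
        · rw [if_neg (by simpa using hsub)]
          rw [if_neg ?hc3]
          case hc3 =>
            rintro ⟨hmem, -⟩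
            exact hsub (List.eq_nil_of_length_eq_zero (hlen name hmem) ▸ hmem)
  | cons c t ih =>
    rw [pvScanGo]
    by_cases hp : pending = ([] : PySem.Set (List Char))
    · subst hp; simp
    · rw [if_neg hp]
      by_cases hlt : (c :: t).length < n
      · rw [if_pos hlt]
        rw [if_neg ?hc4]
        case hc4 =>
          rintro ⟨hmem, hf⟩
          exact hf (pv_find_of_length_lt _ name (by rw [hlen name hmem]; exact hlt))
      · rw [if_neg hlt]
        by_cases hsub : (c :: t).take n ∈ pending
        · rw [if_pos hsub]
          have hlen' : ∀ m ∈ PySem.Set.discard pending ((c :: t).take n), m.length = n := by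
            intro m hm
            exact hlen m ((PySem.Set.mem_discard pending _ m).mp hm).1
          rw [ih _ _ _ hlen']
          by_cases heq : name = (c :: t).take n
          · have hmemname : name ∈ pending := heq ▸ hsub
            have hpre : name <+: (c :: t) := by
              rw [heq]; exact List.take_prefix n (c :: t)
            have hfind : PySem.Chars.find (c :: t) name = 0 := pv_find_of_prefix _ _ hpre
            have hnp : ¬ (name ∈ PySem.Set.discard pending ((c :: t).take n)
                ∧ PySem.Chars.find t name ≠ -1) := by
              rintro ⟨hmem', -⟩
              exact ((PySem.Set.mem_discard pending _ name).mp hmem').2 heq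
            rw [if_neg hnp, heq, PySem.Dict.get?_insert_self, ← heq]
            rw [if_pos ⟨hmemname, by rw [hfind]; norm_num⟩, hfind]
            norm_num
          · rw [PySem.Dict.get?_insert_of_ne _ _ heq]
            by_cases hmem : name ∈ pending
            · have hnpre : ¬ name <+: (c :: t) := by
                intro hh
                exact heq (by
                  have := List.prefix_iff_eq_take.mp hh
                  rw [this, hlen name hmem])
              have hfc := pv_find_cons c t name hnpre
              have hmem' : name ∈ PySem.Set.discard pending ((c :: t).take n) :=
                (PySem.Set.mem_discard pending _ name).mpr ⟨hmem, heq⟩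
              by_cases hft : PySem.Chars.find t name = -1
              · rw [if_neg (by rintro ⟨-, hf⟩; exact hf hft)]
                rw [if_neg (by rintro ⟨-, hf⟩; exact hf (by rw [hfc, if_pos hft]))]
              · rw [if_pos ⟨hmem', hft⟩]
                rw [if_pos ⟨hmem, by rw [hfc, if_neg hft]; have := PySem.Chars.neg_one_le_find t name; omega⟩]
                rw [hfc, if_neg hft]
                congr 1
                ring
            · rw [if_neg (by
                rintro ⟨hmem', -⟩
                exact hmem ((PySem.Set.mem_discard pending _ name).mp hmem').1)]
              rw [if_neg (by rintro ⟨hmem', -⟩; exact hmem hmem')]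
        · rw [if_neg hsub]
          rw [ih _ _ _ hlen]
          by_cases hmem : name ∈ pending
          · have heq : name ≠ (c :: t).take n := fun hh => hsub (hh ▸ hmem)
            have hnpre : ¬ name <+: (c :: t) := by
              intro hh
              exact heq (by
                have := List.prefix_iff_eq_take.mp hh
                rw [this, hlen name hmem])
            have hfc := pv_find_cons c t name hnpre
            by_cases hft : PySem.Chars.find t name = -1
            · rw [if_neg (by rintro ⟨-, hf⟩; exact hf hft)]
              rw [if_neg (by rintro ⟨-, hf⟩; exact hf (by rw [hfc, if_pos hft]))]
            · rw [if_pos ⟨hmem, hft⟩]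
              rw [if_pos ⟨hmem, by rw [hfc, if_neg hft]; have := PySem.Chars.neg_one_le_find t name; omega⟩]
              rw [hfc, if_neg hft]
              congr 1
              ring
          · rw [if_neg (by rintro ⟨hmem', -⟩; exact hmem hmem')]
            rw [if_neg (by rintro ⟨hmem', -⟩; exact hmem hmem')]

-- B's scan keeps the keys of `first` unique.
theorem pvScanGo_nodup (n : Nat) (s : List Char) (pos : Int) (pending : PySem.Set (List Char))
    (first : PySem.Dict (List Char) Int) (h : first.keys.Nodup) :
    (pvScanGo n s pos pending first).keys.Nodup := by
  induction s generalizing pos pending first with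
  | nil =>
    rw [pvScanGo]
    split_ifs with h1 h2 h3
    · exact h
    · exact h
    · exact PySem.Dict.nodup_keys_insert first _ _ h
    · exact h
  | cons c t ih =>
    rw [pvScanGo]
    split_ifs with h1 h2 h3
    · exact h
    · exact h
    · exact ih _ _ _ (PySem.Dict.nodup_keys_insert first _ _ h)
    · exact ih _ _ _ h

-- membership in the first-occurrence dict produced by the fold of scans
theorem pv_fold_scan_get? (low : List Char) (Ls : List (Int × List String))
    (f : PySem.Dict (List Char) Int)
    (hlen : ∀ p ∈ Ls, ∀ m ∈ (PySem.Set.ofList (p.2.map String.toList) : PySem.Set (List Char)),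
      m.length = p.1.toNat) (name : List Char) :
    (Ls.foldl (fun f p => pvScanGo p.1.toNat low 0 (PySem.Set.ofList (p.2.map String.toList)) f)
        f).get? name =
      if (∃ p ∈ Ls, name ∈ (PySem.Set.ofList (p.2.map String.toList) : PySem.Set (List Char)))
          ∧ PySem.Chars.find low name ≠ -1
      then some (PySem.Chars.find low name)
      else f.get? name := by
  induction Ls generalizing f with
  | nil => simp
  | cons p Ls ih =>
    rw [List.foldl_cons, ih _ (fun q hq => hlen q (List.mem_cons_of_mem p hq))]
    rw [pvScanGo_get? _ _ _ _ _ (hlen p (List.mem_cons_self))]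
    by_cases hf : PySem.Chars.find low name = -1
    · rw [if_neg (by rintro ⟨-, hf'⟩; exact hf' hf),
        if_neg (by rintro ⟨-, hf'⟩; exact hf' hf),
        if_neg (by rintro ⟨-, hf'⟩; exact hf' hf)]
    · by_cases hmem : ∃ q ∈ Ls, name ∈ (PySem.Set.ofList (q.2.map String.toList) : PySem.Set (List Char))
      · rw [if_pos ⟨hmem, hf⟩]
        rw [if_pos ⟨⟨hmem.choose, List.mem_cons_of_mem p hmem.choose_spec.1, hmem.choose_spec.2⟩, hf⟩]
      · rw [if_neg (by rintro ⟨hm, -⟩; exact hmem hm)]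
        by_cases hmp : name ∈ (PySem.Set.ofList (p.2.map String.toList) : PySem.Set (List Char))
        · rw [if_pos ⟨hmp, hf⟩, if_pos ⟨⟨p, List.mem_cons_self, hmp⟩, hf⟩]
          norm_num
        · rw [if_neg (by rintro ⟨hm, -⟩; exact hmp hm)]
          rw [if_neg (by
            rintro ⟨⟨q, hq, hmq⟩, -⟩
            rcases List.mem_cons.mp hq with rfl | hq'
            · exact hmp hmq
            · exact hmem ⟨q, hq', hmq⟩)]

-- A's accumulation loop, rewritten as "ofList of the ids of the matching names".
theorem pv_foldA_eq (tl : List Char) (d : PySem.Dict String String) (names : List String)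
    (hmem : ∀ n ∈ names, n ∈ d.keys) :
    names.foldl (fun found name =>
        let nl := name.toList
        let idx := PySem.Chars.find tl nl
        if idx ≠ -1 then
          let before := (idx == 0) ||
            ((PySem.Chars.pyGet? tl (idx - 1)).elim false fun ch => !PySem.Chars.isalnum ch)
          let after := decide (idx + (nl.length : Int) ≥ (tl.length : Int)) ||
            ((PySem.Chars.pyGet? tl (idx + (nl.length : Int))).elim false fun ch => !PySem.Chars.isalnum ch)
          if before && after then
            match d.get? name with
            | some eid => PySem.Set.add found eid
            | none => found
          else found
        else found) PySem.Set.empty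
      = PySem.Set.ofList
          ((names.filter (fun n => pvAMatch tl n.toList)).map (fun n => d.getD n "")) := by
  rw [PySem.List.foldl_congr_mem _ _
      (fun found name =>
        if pvAMatch tl name.toList = true then PySem.Set.add found (d.getD name "")
        else found) _ ?hbody]
  case hbody =>
    intro acc n hn
    have hk : n ∈ d.keys := hmem n hn
    obtain ⟨v, hv⟩ : ∃ v, d.get? n = some v := by
      cases hg : d.get? n with
      | none => exact absurd hk ((PySem.Dict.get?_eq_none_iff_not_mem_keys d n).mp hg)
      | some v => exact ⟨v, rfl⟩
    have hfv : d.getD n "" = v := by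
      rw [PySem.Dict.getD_eq_get?_getD, hv]; rfl
    by_cases hidx : PySem.Chars.find tl n.toList = -1
    · simp only [pvAMatch]
      simp [hidx]
    · simp only [pvAMatch]
      simp only [if_neg hidx]
      rw [if_pos hidx, hfv, hv]
  rw [PySem.List.foldl_ite_eq_foldl_filter
      (p := fun name => pvAMatch tl name.toList = true)
      (f := fun found name => PySem.Set.add found (d.getD name ""))]
  rw [PySem.Set.ofList_eq_foldl, List.foldl_map]
  congr 1
  apply List.filter_congr
  intro x _
  simp

-- B's collection loop, rewritten the same way.
theorem pv_foldB_eq (low : List Char) (d : PySem.Dict String String)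
    (items : List (List Char × Int)) (hmem : ∀ p ∈ items, String.ofList p.1 ∈ d.keys) :
    items.foldl (fun fd p =>
        let i := p.2
        let j := i + (p.1.length : Int)
        if ((i == 0) || ((PySem.Chars.pyGet? low (i - 1)).elim false fun ch => !PySem.Chars.isalnum ch))
            && (decide (j ≥ (low.length : Int)) ||
                ((PySem.Chars.pyGet? low j).elim false fun ch => !PySem.Chars.isalnum ch))
        then match d.get? (String.ofList p.1) with
          | some eid => PySem.Set.add fd eid
          | none => fd
        else fd) PySem.Set.empty
      = PySem.Set.ofList
          (((items.filter (fun p =>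
              ((p.2 == 0) || ((PySem.Chars.pyGet? low (p.2 - 1)).elim false fun ch => !PySem.Chars.isalnum ch))
              && (decide (p.2 + (p.1.length : Int) ≥ (low.length : Int)) ||
                  ((PySem.Chars.pyGet? low (p.2 + (p.1.length : Int))).elim false fun ch => !PySem.Chars.isalnum ch))))).map
            (fun p => d.getD (String.ofList p.1) "")) := by
  rw [PySem.List.foldl_congr_mem _ _
      (fun fd p =>
        if (((p.2 : Int) == 0) || ((PySem.Chars.pyGet? low (p.2 - 1)).elim false fun ch => !PySem.Chars.isalnum ch))
            && (decide (p.2 + (p.1.length : Int) ≥ (low.length : Int)) ||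
                ((PySem.Chars.pyGet? low (p.2 + (p.1.length : Int))).elim false fun ch => !PySem.Chars.isalnum ch)) = true
        then PySem.Set.add fd (d.getD (String.ofList p.1) "") else fd) _ ?hbody]
  case hbody =>
    intro acc p hp
    have hk : String.ofList p.1 ∈ d.keys := hmem p hp
    obtain ⟨v, hv⟩ : ∃ v, d.get? (String.ofList p.1) = some v := by
      cases hg : d.get? (String.ofList p.1) with
      | none => exact absurd hk ((PySem.Dict.get?_eq_none_iff_not_mem_keys d _).mp hg)
      | some v => exact ⟨v, rfl⟩
    have hfv : d.getD (String.ofList p.1) "" = v := by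
      rw [PySem.Dict.getD_eq_get?_getD, hv]; rfl
    simp [hv, hfv]
  rw [PySem.List.foldl_ite_eq_foldl_filter]
  rw [PySem.Set.ofList_eq_foldl, List.foldl_map]
  congr 1
  apply List.filter_congr
  intro x _
  have h00 : (decide (x.2 = 0)) = (x.2 == 0) := by
    by_cases h : x.2 = 0 <;> simp [h]
  simp [h00]

-- ===== VERDICT (by name: the statement is the Claim_ definition above) =====
theorem enrich_entities_spec : Claim_equal_enrich_entities := by
  unfold Claim_equal_enrich_entities
  intro text ei _
  unfold Spec_enrich_entities
  by_cases htext : text = ""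
  · subst htext
    simp [enrich_entities, enrich_entities_alt]
  · by_cases hei : ei = []
    · subst hei
      rw [enrich_entities, enrich_entities_alt, if_pos (Or.inl rfl), if_pos (Or.inr rfl)]
    · rw [enrich_entities, enrich_entities_alt,
        if_neg (by simp [hei, htext]), if_neg (by simp [hei, htext])]
      simp only []
      set d := PySem.Dict.ofList ei with hdd
      set low := PySem.Chars.lower text.toList with hlow
      set names := PySem.List.sorted d.keys (fun n => PySem.Str.len n) true with hnames
      set byLen := d.keys.foldl
        (fun bl name => bl.modify (PySem.Str.len name) [] (· ++ [name])) PySem.Dict.empty with hbl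
      set first := byLen.items.foldl
        (fun f p => pvScanGo p.1.toNat low 0 (PySem.Set.ofList (p.2.map String.toList)) f)
        PySem.Dict.empty with hfirst
      have hnd : d.keys.Nodup := PySem.Dict.nodup_keys_ofList ei
      -- the groups: byLen.getD L [] is the names of length L
      have hgetD : ∀ L : Int, byLen.getD L []
          = d.keys.filter (fun nm => PySem.Str.len nm == L) := by
        intro L
        have hswap : (List.foldl (fun bl name =>
              bl.modify (PySem.Str.len name) [] fun x => x ++ [name]) PySem.Dict.empty d.keys)
            = (List.foldl (fun bl (p : Int × String) => bl.modify p.1 [] fun x => x ++ [p.2])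
                PySem.Dict.empty (d.keys.map (fun nm => (PySem.Str.len nm, nm)))) := by
          rw [List.foldl_map]
        rw [hbl, hswap, PySem.Dict.getD_foldl_modify_append]
        rw [List.filter_map, List.map_map]
        have hid : ((fun (x : Int × String) => x.2) ∘ fun nm => (PySem.Str.len nm, nm))
            = fun nm => nm := rfl
        rw [hid, List.map_id']
        simp only [PySem.Dict.getD_empty, List.nil_append]
        exact List.filter_congr (fun x _ => rfl)
      have hknodup : byLen.keys.Nodup := by
        rw [hbl]
        exact PySem.Dict.nodup_keys_foldl_modify_key d.keys (fun nm => PySem.Str.len nm) []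
          (fun _ nm => (· ++ [nm])) PySem.Dict.empty (by simp)
      have hkeysBL : byLen.keys = PySem.Set.ofList (d.keys.map (fun nm => PySem.Str.len nm)) := by
        rw [hbl, PySem.Dict.keys_foldl_modify_key, PySem.Set.ofList_eq_foldl]
        rfl
      have hitemsBL : byLen.items = byLen.keys.map (fun L => (L, byLen.getD L [])) :=
        PySem.Dict.items_eq_map_keys byLen hknodup []
      -- every pending member of the group of L has length L.toNat
      have hlenGroups : ∀ p ∈ byLen.items,
          ∀ m ∈ (PySem.Set.ofList (p.2.map String.toList) : PySem.Set (List Char)),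
            m.length = p.1.toNat := by
        intro p hp m hm
        rw [hitemsBL] at hp
        obtain ⟨L, hL, rfl⟩ := List.mem_map.mp hp
        rw [PySem.Set.mem_ofList] at hm
        simp only [hgetD L] at hm
        obtain ⟨nm, hnm, rfl⟩ := List.mem_map.mp hm
        have hf := (List.mem_filter.mp hnm).2
        rw [beq_iff_eq, PySem.Str.len_eq] at hf
        omega
      -- first.get? characterised
      have hget : ∀ name : List Char, first.get? name =
          if name ∈ d.keys.map String.toList ∧ PySem.Chars.find low name ≠ -1
          then some (PySem.Chars.find low name) else none := by
        intro name
        rw [hfirst, pv_fold_scan_get? low byLen.items PySem.Dict.empty hlenGroups]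
        rw [PySem.Dict.get?_empty]
        congr 1
        rw [eq_iff_iff]
        constructor
        · rintro ⟨⟨p, hp, hmp⟩, hf⟩
          refine ⟨?_, hf⟩
          rw [hitemsBL] at hp
          obtain ⟨L, hL, rfl⟩ := List.mem_map.mp hp
          rw [PySem.Set.mem_ofList] at hmp
          simp only [hgetD L] at hmp
          obtain ⟨nm, hnm, rfl⟩ := List.mem_map.mp hmp
          exact List.mem_map_of_mem (List.mem_filter.mp hnm).1
        · rintro ⟨hmem, hf⟩
          obtain ⟨k, hk, rfl⟩ := List.mem_map.mp hmem
          refine ⟨⟨(PySem.Str.len k, byLen.getD (PySem.Str.len k) []), ?_, ?_⟩, hf⟩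
          · rw [hitemsBL]
            refine List.mem_map.mpr ⟨PySem.Str.len k, ?_, rfl⟩
            rw [hkeysBL, PySem.Set.mem_ofList]
            exact List.mem_map_of_mem hk
          · rw [PySem.Set.mem_ofList]
            simp only [hgetD]
            refine List.mem_map.mpr ⟨k, ?_, rfl⟩
            exact List.mem_filter.mpr ⟨hk, by rw [beq_iff_eq]⟩
      have hfnd : first.keys.Nodup := by
        rw [hfirst, hitemsBL]
        generalize byLen.keys = Ks
        induction Ks using List.reverseRecOn with
        | nil => simp
        | append_singleton Ks L ihK =>
          simp only [List.map_append, List.map_cons, List.map_nil, List.foldl_append,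
            List.foldl_cons, List.foldl_nil]
          exact pvScanGo_nodup _ _ _ _ _ ihK
      have hkeysfirst : ∀ p ∈ first.items, String.ofList p.1 ∈ d.keys := by
        intro p hp
        have hsome := PySem.Dict.get?_of_mem_items first hp hfnd
        rw [hget p.1] at hsome
        by_cases hc : p.1 ∈ List.map String.toList d.keys ∧ PySem.Chars.find low p.1 ≠ -1
        · obtain ⟨k, hk, hkeq⟩ := List.mem_map.mp hc.1
          rw [← hkeq]
          simpa using hk
        · rw [if_neg hc] at hsome
          exact absurd hsome (by simp)
      rw [pv_foldA_eq low d names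
        (fun n hn => (PySem.List.mem_sorted d.keys (fun n => PySem.Str.len n) true n).mp hn)]
      rw [pv_foldB_eq low d first.items hkeysfirst]
      rw [PySem.List.sorted_id_eq_sorted_id_iff_perm]
      rw [List.perm_ext_iff_of_nodup (PySem.Set.nodup_ofList _) (PySem.Set.nodup_ofList _)]
      intro a
      rw [PySem.Set.mem_ofList, PySem.Set.mem_ofList]
      simp only [List.mem_map, List.mem_filter]
      constructor
      · rintro ⟨k, ⟨hk, hP⟩, rfl⟩
        rw [hnames, PySem.List.mem_sorted] at hk
        -- A matched k; B's first has (k.toList, find low k.toList) and the boundary check passes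
        have hf : PySem.Chars.find low k.toList ≠ -1 := by
          simp only [pvAMatch] at hP
          by_contra hcc
          rw [if_pos hcc] at hP
          exact absurd hP (by simp)
        refine ⟨(k.toList, PySem.Chars.find low k.toList), ⟨?_, ?_⟩, ?_⟩
        · rw [← PySem.Dict.get?_eq_some_iff_mem_items first _ _ hfnd, hget]
          rw [if_pos ⟨List.mem_map_of_mem hk, hf⟩]
        · simp only [pvAMatch, if_neg hf] at hP
          exact hP
        · show d.getD (String.ofList k.toList) "" = d.getD k ""
          rw [String.ofList_toList]
      · rintro ⟨p, ⟨hp, hP⟩, rfl⟩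
        rw [← PySem.Dict.get?_eq_some_iff_mem_items first _ _ hfnd, hget] at hp
        by_cases hc : p.1 ∈ List.map String.toList d.keys ∧ PySem.Chars.find low p.1 ≠ -1
        · rw [if_pos hc] at hp
          obtain ⟨hmem, hf⟩ := hc
          obtain ⟨k, hk, hkeq⟩ := List.mem_map.mp hmem
          have hpi : p.2 = PySem.Chars.find low p.1 := by
            injection hp with h; omega
          refine ⟨k, ⟨?_, ?_⟩, ?_⟩
          · rw [hnames, PySem.List.mem_sorted]; exact hk
          · rw [hpi] at hP
            rw [← hkeq] at hf hP
            simp only [pvAMatch]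
            rw [if_neg hf]
            exact hP
          · rw [← hkeq]
            show d.getD k "" = d.getD (String.ofList k.toList) ""
            rw [String.ofList_toList]
        · rw [if_neg hc] at hp
          exact absurd hp (by simp)
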